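-- pv_equiv track=rewrite | github.com/JayKumarr/OSGM | main.py | grid_search_parameter
-- ===== SOURCE A (Python) =====
-- def grid_search_parameter(list_of_values):
--     alphas = []
--     betas = []
--     for v in list_of_values:
--         alphas.extend(list_of_values)
--     for v in list_of_values:
--         betas .extend([v for x in range(0, len(list_of_values))])
--     return alphas, betas
-- ===== SOURCE B (Python) =====
-- def grid_search_parameter(list_of_values):
--     # Arithmetic-indexing formulation: the k-th grid point is
--     # (list[k % n], list[k // n]) for k in [0, n*n).
--     n = len(list_of_values)
--     alphas = [list_of_values[k % n] for k in range(n * n)]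
--     betas = [list_of_values[k // n] for k in range(n * n)]
--     return alphas, betas
-- ===== Notes on version B (the rewrite author's own statement) =====
-- stated objective: alternative
-- what changed: Replaced A's list-traversal loops (repeated extend of the whole list / per-element comprehension) by direct arithmetic indexing: a single flat index range(n*n) with k % n and k // n picking each coordinate.
import Mathlib
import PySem

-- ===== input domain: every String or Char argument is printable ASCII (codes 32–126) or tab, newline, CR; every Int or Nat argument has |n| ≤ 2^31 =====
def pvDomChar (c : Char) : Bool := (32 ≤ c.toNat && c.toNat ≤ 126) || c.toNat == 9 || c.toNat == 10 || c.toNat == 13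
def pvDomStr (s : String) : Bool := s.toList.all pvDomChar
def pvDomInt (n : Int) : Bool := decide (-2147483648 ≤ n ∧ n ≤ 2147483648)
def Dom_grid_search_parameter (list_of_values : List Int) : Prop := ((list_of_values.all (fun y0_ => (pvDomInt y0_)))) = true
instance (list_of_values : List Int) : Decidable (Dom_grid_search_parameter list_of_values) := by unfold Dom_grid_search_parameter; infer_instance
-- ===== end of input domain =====

-- B replaces A's list-traversal loops by direct arithmetic indexing over one flat range(n*n),
-- picking coordinates with k % n and k // n (objective: alternative).

-- ===== PORT A =====
-- two separate flat loops: alphas.extend(list_of_values); betas.extend([v for x in range(0,len)])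
def grid_search_parameter (list_of_values : List Int) : List Int × List Int :=
  let alphas : List Int := []
  let betas : List Int := []
  let alphas := list_of_values.foldl (fun acc _v => acc ++ list_of_values) alphas
  let betas := list_of_values.foldl
    (fun acc v => acc ++ (PySem.List.pyRange 0 (Int.ofNat list_of_values.length) 1).map (fun _x => v)) betas
  (alphas, betas)

-- ===== PORT B =====
-- one flat index comprehension over range(n*n); list_of_values[k % n] / [k // n].
-- (the index is always in [0, n), so the Python indexing never raises; pyGetD's default is unreachable)
def grid_search_parameter_alt (list_of_values : List Int) : List Int × List Int :=
  let n : Int := list_of_values.length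
  let alphas := (PySem.List.pyRange 0 (n * n) 1).map
    (fun k => PySem.List.pyGetD list_of_values (PySem.Int.mod k n) 0)
  let betas := (PySem.List.pyRange 0 (n * n) 1).map
    (fun k => PySem.List.pyGetD list_of_values (PySem.Int.floordiv k n) 0)
  (alphas, betas)

-- ===== PRECONDITION & SPEC =====
def Spec_grid_search_parameter (list_of_values : List Int) (out : List Int × List Int) : Prop := out = grid_search_parameter_alt list_of_values
instance (list_of_values : List Int) (out : List Int × List Int) : Decidable (Spec_grid_search_parameter list_of_values out) := by unfold Spec_grid_search_parameter; infer_instance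

-- ===== CLAIM (what is proved, stated in full; the proofs are below) =====
def Claim_equal_grid_search_parameter : Prop := ∀ (list_of_values : List Int), Dom_grid_search_parameter list_of_values → Spec_grid_search_parameter list_of_values (grid_search_parameter list_of_values)

-- ===== LEMMAS AND PROOFS =====

-- reading a list back by its indices reproduces it
theorem pv_map_range_getD (l : List Int) :
    (List.range l.length).map (fun j => l.getD j 0) = l := by
  apply List.ext_getElem
  · simp
  · intro i h1 h2
    simp [List.getD_eq_getElem?_getD, List.getElem?_eq_getElem h2]

-- B's alphas column (on the Nat side): k % n sweeps the whole list, m times over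
theorem pv_mod_col (l : List Int) (m : Nat) :
    (List.range (m * l.length)).map (fun k => l.getD (k % l.length) 0)
      = (List.range m).flatMap (fun _ => l) := by
  induction m with
  | zero => simp
  | succ m ih =>
    rw [Nat.succ_mul, List.range_add, List.map_append, List.map_map, ih,
        List.range_succ, List.flatMap_append]
    congr 1
    · rcases Nat.eq_zero_or_pos l.length with h | h
      · simp [List.eq_nil_of_length_eq_zero h]
      · have hmap : (List.range l.length).map
            ((fun k => l.getD (k % l.length) 0) ∘ (fun x => m * l.length + x))
            = (List.range l.length).map (fun j => l.getD j 0) := by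
          apply List.map_congr_left
          intro j hj
          simp only [Function.comp, List.mem_range] at *
          rw [Nat.add_comm, Nat.add_mul_mod_self_right, Nat.mod_eq_of_lt hj]
        rw [hmap, pv_map_range_getD]
        simp

-- B's betas column (on the Nat side): k / n holds each element for a run of n
theorem pv_div_col (l : List Int) (m : Nat) (hm : m ≤ l.length) :
    (List.range (m * l.length)).map (fun k => l.getD (k / l.length) 0)
      = (l.take m).flatMap (fun v => List.replicate l.length v) := by
  induction m with
  | zero => simp
  | succ m ih =>
    have hlt : m < l.length := hm
    have hpos : 0 < l.length := Nat.lt_of_le_of_lt (Nat.zero_le m) hlt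
    rw [Nat.succ_mul, List.range_add, List.map_append, List.map_map,
        ih (Nat.le_of_lt hlt), List.take_add_one, List.flatMap_append]
    congr 1
    have hmap : (List.range l.length).map
        ((fun k => l.getD (k / l.length) 0) ∘ (fun x => m * l.length + x))
        = (List.range l.length).map (fun _ => l.getD m 0) := by
      apply List.map_congr_left
      intro j hj
      simp only [Function.comp, List.mem_range] at *
      rw [Nat.add_comm, Nat.add_mul_div_right _ _ hpos, Nat.div_eq_of_lt hj, Nat.zero_add]
    rw [hmap]
    simp [List.getElem?_eq_getElem hlt, List.getD_eq_getElem?_getD, List.map_const']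

-- A's first loop: repeatedly extending by l
theorem pv_foldA (l m : List Int) (a : List Int) :
    m.foldl (fun acc _ => acc ++ l) a = a ++ (List.range m.length).flatMap (fun _ => l) := by
  induction m generalizing a with
  | nil => simp
  | cons v t ih =>
    simp only [List.foldl_cons, ih, List.length_cons, List.range_succ_eq_map]
    simp [List.flatMap_cons, List.flatMap_map, List.append_assoc]

-- A's second loop: extending by a constant block for each element
theorem pv_foldB (l : List Int) (n : Nat) (a : List Int) :
    l.foldl (fun acc v => acc ++ List.replicate n v) a
      = a ++ l.flatMap (fun v => List.replicate n v) := by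
  induction l generalizing a with
  | nil => simp
  | cons v t ih => simp [List.foldl, ih]

-- ===== VERDICT (by name: the statement is the Claim_ definition above) =====
theorem grid_search_parameter_spec : Claim_equal_grid_search_parameter := by
  intro l _
  unfold Spec_grid_search_parameter
  simp only [grid_search_parameter, grid_search_parameter_alt, Int.ofNat_eq_natCast]
  have hcast : ((l.length : Int) * (l.length : Int)) = ((l.length * l.length : Nat) : Int) := by
    push_cast; ring
  rw [hcast, PySem.List.pyRange_zero_natCast, PySem.List.pyRange_zero_natCast]
  simp only [List.map_map]
  have h1 : (List.range (l.length * l.length)).map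
      ((fun k => PySem.List.pyGetD l (PySem.Int.mod k (l.length : Int)) 0) ∘ (fun k : Nat => (k : Int)))
      = (List.range (l.length * l.length)).map (fun k => l.getD (k % l.length) 0) := by
    apply List.map_congr_left; intro k _
    simp only [Function.comp_apply, PySem.Int.mod_natCast, PySem.List.pyGetD_natCast]
  have h2 : (List.range (l.length * l.length)).map
      ((fun k => PySem.List.pyGetD l (PySem.Int.floordiv k (l.length : Int)) 0) ∘ (fun k : Nat => (k : Int)))
      = (List.range (l.length * l.length)).map (fun k => l.getD (k / l.length) 0) := by
    apply List.map_congr_left; intro k _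
    simp only [Function.comp_apply, PySem.Int.floordiv_natCast, PySem.List.pyGetD_natCast]
  rw [h1, h2, pv_mod_col, pv_div_col l l.length (Nat.le_refl _), List.take_length]
  rw [pv_foldA l l []]
  have h3 : ∀ v : Int, (List.range l.length).map ((fun _ => v) ∘ (fun k : Nat => (k : Int)))
      = List.replicate l.length v := by
    intro v
    rw [show ((fun _ => v) ∘ (fun k : Nat => (k : Int))) = (fun _ : Nat => v) from rfl,
        List.map_const', List.length_range]
  simp only [h3]
  rw [pv_foldB l l.length []]
  simp
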